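-- pv_equiv track=rewrite | github.com/andvagorion/adventofcode | 2021/05.py | diag_line
-- ===== SOURCE A (Python) =====
-- def diag_line(p1, p2):
--     step_y = 1 if p2[1] > p1[1] else - 1
--     step_x = 1 if p2[0] > p1[0] else - 1
--
--     points = []
--
--     start_x = p1[0]
--     start_y = p1[1]
--
--     end_x = p2[0]
--     end_y = p2[1]
--
--     while start_x != end_x and start_y != end_y:
--         points.append((start_x, start_y))
--         start_x += step_x
--         start_y += step_y
--     points.append((start_x, start_y))
--
--     return points
-- ===== SOURCE B (Python) =====
-- def diag_line(p1, p2):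
--     def axis(a, b):
--         return range(a, b + 1) if b > a else range(a, b - 1, -1)
--     return list(zip(axis(p1[0], p2[0]), axis(p1[1], p2[1])))
-- ===== Notes on version B (the rewrite author's own statement) =====
-- stated objective: simpler
-- what changed: Instead of A's single incremental walk with a per-step two-axis stop test, B builds the two inclusive coordinate ranges of the axes independently and zips them, letting zip's truncation to the shorter sequence implement the stop-at-first-axis-end rule.
import Mathlib
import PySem

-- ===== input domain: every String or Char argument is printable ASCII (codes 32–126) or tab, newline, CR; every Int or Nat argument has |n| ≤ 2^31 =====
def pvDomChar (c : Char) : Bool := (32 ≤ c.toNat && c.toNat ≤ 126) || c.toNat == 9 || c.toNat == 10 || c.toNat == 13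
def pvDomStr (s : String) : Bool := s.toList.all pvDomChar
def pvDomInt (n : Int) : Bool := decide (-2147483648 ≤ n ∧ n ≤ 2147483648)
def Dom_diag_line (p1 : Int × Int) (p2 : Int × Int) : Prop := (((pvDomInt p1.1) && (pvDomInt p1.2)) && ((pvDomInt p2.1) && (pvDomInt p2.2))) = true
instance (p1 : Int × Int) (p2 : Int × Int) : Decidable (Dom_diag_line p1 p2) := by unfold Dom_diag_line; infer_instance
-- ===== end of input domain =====

-- B builds the two inclusive axis coordinate ranges independently and zips them (zip truncation = A's stop-at-first-axis rule); simpler, same cost.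


-- ===== PORT A =====
-- the while-loop, transliterated with a fuel that is always sufficient (|dx|+|dy|+1 steps)
def diagLoop (fuel : Nat) (sx sy ex ey stepx stepy : Int) : List (Int × Int) :=
  match fuel with
  | 0 => [(sx, sy)]
  | f + 1 =>
    if sx ≠ ex ∧ sy ≠ ey then
      (sx, sy) :: diagLoop f (sx + stepx) (sy + stepy) ex ey stepx stepy
    else
      [(sx, sy)]

def diag_line (p1 : Int × Int) (p2 : Int × Int) : List (Int × Int) :=
  let step_y : Int := if p2.2 > p1.2 then 1 else -1
  let step_x : Int := if p2.1 > p1.1 then 1 else -1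
  diagLoop ((p2.1 - p1.1).natAbs + (p2.2 - p1.2).natAbs + 1) p1.1 p1.2 p2.1 p2.2 step_x step_y

-- ===== PORT B =====
-- Python's range objects are lazy; a range is ported as a descriptor (start, step, length),
-- and zip(range, range) as the fused stepping recursion Python's lazy zip performs (exact: it
-- pulls one element from each range per step and stops after min-of-lengths steps).
def pvAxis (a b : Int) : Int × Int × Nat :=
  if b > a then (a, 1, (b + 1 - a).toNat) else (a, -1, (a - (b - 1)).toNat)

def pvZipGo : Nat → Int → Int → Int → Int → List (Int × Int)
  | 0, _, _, _, _ => []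
  | n + 1, x, sx, y, sy => (x, y) :: pvZipGo n (x + sx) sx (y + sy) sy

def pvZip (r1 r2 : Int × Int × Nat) : List (Int × Int) :=
  pvZipGo (min r1.2.2 r2.2.2) r1.1 r1.2.1 r2.1 r2.2.1

def diag_line_alt (p1 : Int × Int) (p2 : Int × Int) : List (Int × Int) :=
  pvZip (pvAxis p1.1 p2.1) (pvAxis p1.2 p2.2)

-- ===== PRECONDITION & SPEC =====
def Spec_diag_line (p1 : Int × Int) (p2 : Int × Int) (out : List (Int × Int)) : Prop := out = diag_line_alt p1 p2
instance (p1 : Int × Int) (p2 : Int × Int) (out : List (Int × Int)) : Decidable (Spec_diag_line p1 p2 out) := by unfold Spec_diag_line; infer_instance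

-- ===== CLAIM (what is proved, stated in full; the proofs are below) =====
def Claim_equal_diag_line : Prop := ∀ (p1 : Int × Int) (p2 : Int × Int), Dom_diag_line p1 p2 → Spec_diag_line p1 p2 (diag_line p1 p2)

-- ===== LEMMAS AND PROOFS =====

-- the loop, run from sx/sy toward sx + a*stepx / sy + b*stepy, makes exactly min a b steps
theorem diagLoop_eq (a : Nat) : ∀ (b fuel : Nat) (sx sy stepx stepy : Int),
    (stepx = 1 ∨ stepx = -1) → (stepy = 1 ∨ stepy = -1) → min a b ≤ fuel →
    diagLoop fuel sx sy (sx + a * stepx) (sy + b * stepy) stepx stepy =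
      (List.range (min a b + 1)).map (fun (i : Nat) => (sx + (i : Int) * stepx, sy + (i : Int) * stepy)) := by
  induction a with
  | zero =>
    intro b fuel sx sy stepx stepy hx hy hf
    cases fuel with
    | zero => simp [diagLoop]
    | succ f => simp [diagLoop]
  | succ a ih =>
    intro b fuel sx sy stepx stepy hx hy hf
    cases b with
    | zero =>
      cases fuel with
      | zero => simp [diagLoop]
      | succ f => simp [diagLoop]
    | succ b =>
      have hmin : min (a + 1) (b + 1) = min a b + 1 := by omega
      rw [hmin] at hf ⊢
      cases fuel with
      | zero => omega
      | succ f =>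
        have hxne : sx ≠ sx + ((a : Int) + 1) * stepx := by
          rcases hx with h | h <;> simp [h] <;> omega
        have hyne : sy ≠ sy + ((b : Int) + 1) * stepy := by
          rcases hy with h | h <;> simp [h] <;> omega
        have hex : sx + ((a : Nat) + 1 : Nat) * stepx = (sx + stepx) + (a : Int) * stepx := by
          push_cast; ring
        have hey : sy + ((b : Nat) + 1 : Nat) * stepy = (sy + stepy) + (b : Int) * stepy := by
          push_cast; ring
        have hcond : sx ≠ sx + ((a : Nat) + 1 : Nat) * stepx ∧ sy ≠ sy + ((b : Nat) + 1 : Nat) * stepy := by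
          push_cast
          exact ⟨hxne, hyne⟩
        simp only [diagLoop]
        rw [if_pos hcond, hex, hey]
        conv_rhs => rw [List.range_succ_eq_map]
        rw [ih b f (sx + stepx) (sy + stepy) stepx stepy hx hy (by omega)]
        simp only [List.map_cons, List.map_map, List.cons.injEq]
        refine ⟨by simp, ?_⟩
        apply List.map_congr_left
        intro i _
        simp only [Function.comp_apply]
        refine Prod.ext ?_ ?_ <;> (simp only []; push_cast; ring)

theorem diagLoop_eq' (fuel : Nat) (sx sy ex ey stepx stepy : Int) (a b : Nat)
    (ha : ex = sx + a * stepx) (hb : ey = sy + b * stepy)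
    (hx : stepx = 1 ∨ stepx = -1) (hy : stepy = 1 ∨ stepy = -1) (hf : min a b ≤ fuel) :
    diagLoop fuel sx sy ex ey stepx stepy =
      (List.range (min a b + 1)).map (fun (i : Nat) => (sx + (i : Int) * stepx, sy + (i : Int) * stepy)) := by
  subst ha hb; exact diagLoop_eq a b fuel sx sy stepx stepy hx hy hf

theorem decomp (s e : Int) : e = s + ((e - s).natAbs : Int) * (if e > s then 1 else -1) := by
  by_cases h : e > s
  · rw [if_pos h, mul_one]; omega
  · rw [if_neg h, mul_neg_one]; omega

theorem pvAxis_spec (a b : Int) :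
    pvAxis a b = (a, (if b > a then (1 : Int) else -1), (b - a).natAbs + 1) := by
  unfold pvAxis
  split_ifs with h
  · have : (b + 1 - a).toNat = (b - a).natAbs + 1 := by omega
    rw [this]
  · have : (a - (b - 1)).toNat = (b - a).natAbs + 1 := by omega
    rw [this]

theorem pvZipGo_eq (n : Nat) : ∀ (x sx y sy : Int),
    pvZipGo n x sx y sy =
      (List.range n).map (fun (i : Nat) => (x + (i : Int) * sx, y + (i : Int) * sy)) := by
  induction n with
  | zero => intro x sx y sy; simp [pvZipGo]
  | succ n ih =>
    intro x sx y sy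
    rw [List.range_succ_eq_map]
    simp only [pvZipGo, ih, List.map_cons, List.map_map, List.cons.injEq]
    refine ⟨by simp, ?_⟩
    apply List.map_congr_left
    intro i _
    simp only [Function.comp_apply]
    refine Prod.ext ?_ ?_ <;> (simp only []; push_cast; ring)

-- ===== VERDICT (by name: the statement is the Claim_ definition above) =====
theorem diag_line_spec : Claim_equal_diag_line := by
  intro p1 p2 _
  unfold Spec_diag_line diag_line diag_line_alt pvZip
  rw [diagLoop_eq' _ _ _ _ _ _ _ (p2.1 - p1.1).natAbs (p2.2 - p1.2).natAbs
      (decomp p1.1 p2.1) (decomp p1.2 p2.2)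
      (by split_ifs <;> simp) (by split_ifs <;> simp) (by omega)]
  rw [pvAxis_spec, pvAxis_spec]
  simp only []
  rw [pvZipGo_eq]
  have : min ((p2.1 - p1.1).natAbs + 1) ((p2.2 - p1.2).natAbs + 1) =
      min (p2.1 - p1.1).natAbs (p2.2 - p1.2).natAbs + 1 := by omega
  rw [this]
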